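-- pv_equiv track=rewrite | github.com/LividInstruments/LiveRemoteScripts | Livid_OhmModes_2/OhmModes.py | generate_strip_string
-- ===== SOURCE A (Python) =====
-- def generate_strip_string(display_string):
-- 	NUM_CHARS_PER_DISPLAY_STRIP = 12
-- 	if not display_string:
-- 		return ' ' * NUM_CHARS_PER_DISPLAY_STRIP
-- 	if len(display_string.strip()) > NUM_CHARS_PER_DISPLAY_STRIP - 1 and display_string.endswith('dB') and display_string.find('.') != -1:
-- 		display_string = display_string[:-2]
-- 	if len(display_string) > NUM_CHARS_PER_DISPLAY_STRIP - 1: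
-- 		for um in [' ',
-- 		 'i',
-- 		 'o',
-- 		 'u',
-- 		 'e',
-- 		 'a']:
-- 			while len(display_string) > NUM_CHARS_PER_DISPLAY_STRIP - 1 and display_string.rfind(um, 1) != -1:
-- 				um_pos = display_string.rfind(um, 1)
-- 				display_string = display_string[:um_pos] + display_string[um_pos + 1:]
--
-- 	else:
-- 		display_string = display_string.center(NUM_CHARS_PER_DISPLAY_STRIP - 1)
-- 	ret = u''
-- 	for i in range(NUM_CHARS_PER_DISPLAY_STRIP - 1):
-- 		if ord(display_string[i]) > 127 or ord(display_string[i]) < 0: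
-- 			ret += ' '
-- 		else:
-- 			ret += display_string[i]
--
-- 	ret += ' '
-- 	return ret
-- ===== SOURCE B (Python) =====
-- def generate_strip_string(display_string):
--     if not display_string:
--         return ' ' * 12
--     s = display_string
--     if len(s.strip()) > 11 and s.endswith('dB') and '.' in s:
--         s = s[:-2]
--     if len(s) > 11:
--         need = len(s) - 11
--         head, tail = s[0], list(s[1:])
--         for c in ' iouea':
--             kept = []
--             for ch in reversed(tail):
--                 if ch == c and need:
--                     need -= 1
--                 else:
--                     kept.append(ch)
--             kept.reverse()
--             tail = kept
--         s = head + ''.join(tail)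
--     else:
--         s = s.center(11)
--     return ''.join(ch if 0 <= ord(ch) <= 127 else ' ' for ch in s[:11]) + ' '
-- ===== Notes on version B (the rewrite author's own statement) =====
-- stated objective: alternative
-- what changed: Replaces the while-loop that repeatedly calls rfind and rebuilds the whole string per removed character by one right-to-left pass per vowel class over a tail list with a shared removal budget, rebuilding the string once.
import Mathlib
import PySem

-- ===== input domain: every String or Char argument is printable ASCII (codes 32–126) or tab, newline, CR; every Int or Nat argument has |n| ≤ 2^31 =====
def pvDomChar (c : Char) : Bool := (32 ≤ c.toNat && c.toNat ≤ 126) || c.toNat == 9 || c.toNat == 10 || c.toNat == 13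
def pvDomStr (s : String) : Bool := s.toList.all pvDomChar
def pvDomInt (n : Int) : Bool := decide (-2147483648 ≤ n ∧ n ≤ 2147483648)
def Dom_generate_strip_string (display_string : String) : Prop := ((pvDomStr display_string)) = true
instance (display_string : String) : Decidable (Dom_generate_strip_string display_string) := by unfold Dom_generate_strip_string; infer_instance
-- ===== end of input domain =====

-- B replaces A's repeated rfind-and-reslice removal loop by one right-to-left pass per vowel
-- class with a shared removal budget (objective: alternative algorithm, same results).


-- ===== PORT A =====
-- shared helper: Python str.center(width) (CPython's unicode_center, exact hand port on ASCII:
-- left margin = marg//2 + (marg & width & 1)); both Pythons call the same builtin here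
def pyCenter (l : List Char) (w : Nat) : List Char :=
  if w ≤ l.length then l
  else
    let marg := w - l.length
    let left := marg / 2 + (marg &&& w &&& 1)
    List.replicate left ' ' ++ l ++ List.replicate (marg - left) ' '

-- "while len(s) > 11 and s.rfind(um, 1) != -1: p = s.rfind(um, 1); s = s[:p] + s[p+1:]";
-- fuel merely bounds the iteration count (each pass removes one char, so the entry length suffices)
def gssRemLoop (c : Char) : Nat → List Char → List Char
  | 0, s => s
  | fuel+1, s =>
    if 12 - 1 < s.length ∧ PySem.Chars.rfindFrom s [c] 1 none ≠ -1 then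
      gssRemLoop c fuel
        (PySem.List.slice s none (some ((PySem.Chars.rfindFrom s [c] 1 none).toNat : Int)) ++
         PySem.List.slice s (some (((PySem.Chars.rfindFrom s [c] 1 none).toNat : Int) + 1)) none)
    else s

-- NUM_CHARS_PER_DISPLAY_STRIP = 12, so every threshold below is written 12 - 1 as in the source
def generate_strip_string (display_string : String) : String :=
  if display_string = "" then "            "
  else
    let l := display_string.toList
    let l1 := if 12 - 1 < (PySem.Chars.strip l).length ∧ PySem.Chars.endswith l ['d','B'] = true ∧
                 PySem.Chars.find l ['.'] ≠ -1
              then PySem.List.slice l none (some (-2)) else l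
    let l2 := if 12 - 1 < l1.length
              then [' ', 'i', 'o', 'u', 'e', 'a'].foldl (fun s um => gssRemLoop um s.length s) l1
              else pyCenter l1 (12 - 1)
    let ret := (PySem.List.pyRange 0 (12 - 1) 1).foldl
      (fun r i => match PySem.List.pyGet? l2 i with
        | some ch => r ++ (if 127 < (ch.toNat : Int) ∨ (ch.toNat : Int) < 0 then [' '] else [ch])
        | none => r)  -- none unreachable: where Python indexes, l2 has at least 11 chars
      []
    String.ofList (ret ++ [' '])

-- ===== PORT B =====
-- (same NUM_CHARS_PER_DISPLAY_STRIP = 12 constant; thresholds written 12 - 1)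
-- one vowel class: scan the reversed tail once, dropping up to `need` matches (rightmost first),
-- then restore order ("kept = []; for ch in reversed(tail): …; kept.reverse()")
def gssClassStep (st : Nat × List Char) (c : Char) : Nat × List Char :=
  let p := st.2.reverse.foldl
    (fun (q : Nat × List Char) ch => if ch = c ∧ q.1 ≠ 0 then (q.1 - 1, q.2) else (q.1, q.2 ++ [ch]))
    (st.1, [])
  (p.1, p.2.reverse)

def generate_strip_string_alt (display_string : String) : String :=
  if display_string = "" then "            "
  else
    let l := display_string.toList
    let s := if 12 - 1 < (PySem.Chars.strip l).length ∧ PySem.Chars.endswith l ['d','B'] = true ∧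
                PySem.Chars.isIn ['.'] l = true
             then PySem.List.slice l none (some (-2)) else l
    let s2 := if 12 - 1 < s.length then
        let need := s.length - (12 - 1)
        let tail := PySem.List.slice s (some 1) none
        let res := [' ', 'i', 'o', 'u', 'e', 'a'].foldl gssClassStep (need, tail)
        (match PySem.List.pyGet? s 0 with | some h => [h] | none => []) ++ res.2
      else pyCenter s (12 - 1)
    String.ofList
      ((PySem.List.slice s2 none (some (12 - 1))).map
        (fun ch => if 0 ≤ (ch.toNat : Int) ∧ (ch.toNat : Int) ≤ 127 then ch else ' ') ++ [' '])

-- ===== PRECONDITION & SPEC =====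
def Spec_generate_strip_string (display_string : String) (out : String) : Prop := out = generate_strip_string_alt display_string
instance (display_string : String) (out : String) : Decidable (Spec_generate_strip_string display_string out) := by unfold Spec_generate_strip_string; infer_instance

-- ===== CLAIM (what is proved, stated in full; the proofs are below) =====
def Claim_equal_generate_strip_string : Prop := ∀ (display_string : String), Dom_generate_strip_string display_string → Spec_generate_strip_string display_string (generate_strip_string display_string)

-- ===== LEMMAS AND PROOFS =====

-- proof-only model of B's per-class scan: drop the first k occurrences of c (left scan)
def dropKL (c : Char) : Nat → List Char → List Char
  | 0, xs => xs
  | _, [] => []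
  | k+1, x :: xs => if x = c then dropKL c k xs else x :: dropKL c (k+1) xs

@[simp] lemma dropKL_zero (c : Char) (xs : List Char) : dropKL c 0 xs = xs := by
  cases xs <;> rfl

@[simp] lemma dropKL_nil (c : Char) (k : Nat) : dropKL c k [] = [] := by
  cases k <;> rfl

lemma dropKL_of_not_mem (c : Char) (k : Nat) (xs : List Char) (h : c ∉ xs) :
    dropKL c k xs = xs := by
  induction xs generalizing k with
  | nil => cases k <;> rfl
  | cons x xs ih =>
    cases k with
    | zero => rfl
    | succ k =>
      have hx : x ≠ c := fun hxc => h (hxc ▸ List.mem_cons_self)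
      simp [dropKL, hx, ih _ (fun hm => h (List.mem_cons_of_mem _ hm))]

lemma dropKL_erase (c : Char) (k : Nat) (xs : List Char) (hk : 0 < k) (hm : c ∈ xs) :
    dropKL c k xs = dropKL c (k - 1) (xs.erase c) := by
  induction xs generalizing k with
  | nil => cases hm
  | cons x xs ih =>
    obtain ⟨m, rfl⟩ : ∃ m, k = m + 1 := ⟨k - 1, by omega⟩
    by_cases hx : x = c
    · subst hx
      simp [dropKL, List.erase_cons_head]
    · have hm' : c ∈ xs := by
        rcases List.mem_cons.mp hm with h | h
        · exact absurd h.symm hx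
        · exact h
      have hbe : (x == c) = false := beq_false_of_ne hx
      have hih : dropKL c (m + 1) xs = dropKL c m (xs.erase c) := by
        have := ih (m + 1) (by omega) hm'
        simpa using this
      cases m with
      | zero => simp [dropKL, hx, List.erase_cons, hbe, hih]
      | succ j => simp [dropKL, hx, List.erase_cons, hbe, hih]

lemma dropKL_length (c : Char) (k : Nat) (xs : List Char) :
    (dropKL c k xs).length = xs.length - min k (xs.count c) := by
  induction xs generalizing k with
  | nil => cases k <;> simp [dropKL]
  | cons x xs ih =>
    cases k with
    | zero => simp [dropKL]
    | succ k =>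
      by_cases hx : x = c
      · subst hx
        have hc : xs.count x ≤ xs.length := List.count_le_length
        have h2 : dropKL x (k + 1) (x :: xs) = dropKL x k xs := by simp [dropKL]
        rw [h2, ih]
        simp only [List.count_cons_self, List.length_cons]
        omega
      · have hbe : (x == c) = false := beq_false_of_ne hx
        have hc : xs.count c ≤ xs.length := List.count_le_length
        simp only [dropKL, if_neg hx, List.length_cons, ih, List.count_cons, hbe,
          if_false, Bool.false_eq_true, Nat.add_zero]
        omega

-- B's inner reversed-scan fold computes dropKL and spends min k (count) of the budget
lemma foldB_eq_dropKL (c : Char) (xs : List Char) : ∀ (k : Nat) (acc : List Char),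
    xs.foldl (fun (q : Nat × List Char) ch =>
        if ch = c ∧ q.1 ≠ 0 then (q.1 - 1, q.2) else (q.1, q.2 ++ [ch])) (k, acc)
      = (k - min k (xs.count c), acc ++ dropKL c k xs) := by
  induction xs with
  | nil => intro k acc; simp
  | cons x xs ih =>
    intro k acc
    by_cases hx : x = c
    · subst hx
      cases k with
      | zero =>
        rw [List.foldl_cons, if_neg (by simp), ih]
        simp
      | succ k =>
        rw [List.foldl_cons]
        dsimp only
        rw [if_pos ⟨rfl, Nat.succ_ne_zero k⟩]
        simp only [Nat.add_sub_cancel]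
        rw [ih]
        have h1 : k + 1 - min (k + 1) ((x :: xs).count x) = k - min k (xs.count x) := by
          simp only [List.count_cons_self]; omega
        have h2 : dropKL x (k + 1) (x :: xs) = dropKL x k xs := by simp [dropKL]
        rw [← h1, ← h2]
    · have hbe : (x == c) = false := beq_false_of_ne hx
      have hcnt : (x :: xs).count c = xs.count c := by simp [List.count_cons, hbe]
      cases k with
      | zero =>
        rw [List.foldl_cons, if_neg (by simp), ih]
        simp
      | succ k =>
        rw [List.foldl_cons, if_neg (by simp [hx]), ih, hcnt]
        have h2 : dropKL c (k + 1) (x :: xs) = x :: dropKL c (k + 1) xs := by simp [dropKL, hx]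
        rw [h2, List.append_cons, List.append_assoc]
        simp

-- unfolding equations of PySem.Chars.rfind.go
lemma go_zero (s sub : List Char) : PySem.Chars.rfind.go s sub 0 = if sub.isPrefixOf s then 0 else -1 := rfl
lemma go_succ (s sub : List Char) (j : Nat) : PySem.Chars.rfind.go s sub (j+1) = if sub.isPrefixOf (s.drop (j+1)) then ((j+1 : Nat) : Int) else PySem.Chars.rfind.go s sub j := rfl

lemma go_unfold (s sub : List Char) (j : Nat) : PySem.Chars.rfind.go s sub j =
    if sub.isPrefixOf (s.drop j) then ((j : Nat) : Int)
    else if j = 0 then -1 else PySem.Chars.rfind.go s sub (j - 1) := by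
  cases j with
  | zero => simp [go_zero]
  | succ j => simp [go_succ]

lemma isPrefixOf_singleton_cons_append (c x : Char) (xs ys : List Char) :
    [c].isPrefixOf ((x :: xs) ++ ys) = [c].isPrefixOf (x :: xs) := by
  simp [List.isPrefixOf]

lemma rfind_go_append (c a : Char) (t : List Char) :
    ∀ j, j < t.length → PySem.Chars.rfind.go (t ++ [a]) [c] j = PySem.Chars.rfind.go t [c] j := by
  intro j hj
  induction j with
  | zero =>
    obtain ⟨x, xs, rfl⟩ : ∃ x xs, t = x :: xs := by
      cases t with
      | nil => simp at hj
      | cons x xs => exact ⟨x, xs, rfl⟩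
    simp [go_zero, isPrefixOf_singleton_cons_append]
  | succ j ih =>
    have hd : (t ++ [a]).drop (j + 1) = t.drop (j + 1) ++ [a] :=
      List.drop_append_of_le_length (by omega)
    obtain ⟨x, xs, hx⟩ : ∃ x xs, t.drop (j + 1) = x :: xs := by
      have hne : t.drop (j + 1) ≠ [] := by simp [List.drop_eq_nil_iff]; omega
      cases h : t.drop (j + 1) with
      | nil => exact absurd h hne
      | cons x xs => exact ⟨x, xs, rfl⟩
    rw [go_succ, go_succ, hd, hx, isPrefixOf_singleton_cons_append]
    split
    · rfl
    · exact ih (by omega)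

lemma rfind_single (c : Char) (t : List Char) :
    PySem.Chars.rfind t [c] =
      if c ∈ t then ((t.length - 1 - List.idxOf c t.reverse : Nat) : Int) else -1 := by
  induction t using List.reverseRecOn with
  | nil => simp [PySem.Chars.rfind, go_zero, List.isPrefixOf]
  | append_singleton t a ih =>
    rw [PySem.Chars.rfind, show (t ++ [a]).length = t.length + 1 by simp, go_succ]
    rw [show (t ++ [a]).drop (t.length + 1) = ([] : List Char) by simp]
    rw [show ([c].isPrefixOf ([] : List Char)) = false from rfl]
    simp only [Bool.false_eq_true, if_false]
    rw [go_unfold]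
    rw [show (t ++ [a]).drop t.length = [a] from List.drop_left]
    rw [show ([c].isPrefixOf [a]) = (c == a) by simp [List.isPrefixOf]]
    by_cases hac : c = a
    · subst hac
      simp only [beq_self_eq_true, if_true]
      rw [if_pos (by simp)]
      simp [List.idxOf_cons_self]
    · have hbe : (c == a) = false := beq_false_of_ne hac
      rw [hbe]
      simp only [Bool.false_eq_true, if_false]
      have hmem : (c ∈ t ++ [a]) ↔ c ∈ t := by simp [hac]
      cases t with
      | nil => simp [hac]
      | cons x xs =>
        rw [if_neg (by simp)]
        rw [show (x :: xs).length - 1 = xs.length by simp]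
        rw [rfind_go_append c a (x :: xs) xs.length (by simp)]
        have hrf : PySem.Chars.rfind (x :: xs) [c] = PySem.Chars.rfind.go (x :: xs) [c] xs.length := by
          rw [PySem.Chars.rfind, show (x :: xs).length = xs.length + 1 by simp, go_succ]
          rw [show (x :: xs).drop (xs.length + 1) = ([] : List Char) by simp]
          rfl
        rw [← hrf, ih]
        rw [show (x :: xs ++ [a]).reverse = a :: (x :: xs).reverse by simp]
        rw [List.idxOf_cons_ne _ (by exact fun h => hac (by simpa using h.symm))]
        by_cases hmt : c ∈ x :: xs
        · have hk : List.idxOf c (x :: xs).reverse < (x :: xs).length := by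
            have := List.idxOf_lt_length_of_mem (List.mem_reverse.mpr hmt)
            simpa using this
          rw [if_pos hmt, if_pos (by have := List.mem_cons.mp hmt; tauto)]
          congr 1
          simp only [List.length_append, List.length_cons, List.length_nil] at *
          omega
        · rw [if_neg hmt, if_neg (by simp at hmt ⊢; exact ⟨fun h => hmt.1 h, hmt.2, hac⟩)]

-- deleting the last occurrence of c (at index len-1-k in t) = erase in the reverse
lemma eraseIdx_last_occ (c : Char) (t : List Char) (hm : c ∈ t) :
    t.eraseIdx (t.length - 1 - List.idxOf c t.reverse) = (t.reverse.erase c).reverse := by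
  induction t using List.reverseRecOn with
  | nil => cases hm
  | append_singleton t a ih =>
    by_cases hac : c = a
    · subst hac
      simp only [List.reverse_append, List.reverse_cons, List.reverse_nil, List.nil_append,
        List.singleton_append, List.idxOf_cons_self, List.length_append, List.length_cons,
        List.length_nil, List.erase_cons_head, List.reverse_reverse]
      rw [show t.length + (0+1) - 1 - 0 = t.length by omega]
      rw [List.eraseIdx_append_of_length_le (le_refl _)]
      simp
    · have hmt : c ∈ t := by
        rcases List.mem_append.mp hm with h | h
        · exact h
        · simp at h; exact absurd h hac
      have hk : List.idxOf c t.reverse < t.length := by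
        have := List.idxOf_lt_length_of_mem (List.mem_reverse.mpr hmt)
        simpa using this
      have hbe : (a == c) = false := beq_false_of_ne (fun h => hac h.symm)
      simp only [List.reverse_append, List.reverse_cons, List.reverse_nil, List.nil_append,
        List.singleton_append, List.length_append, List.length_cons, List.length_nil]
      rw [List.idxOf_cons_ne _ (by exact fun h => hac (by simpa using h.symm))]
      rw [List.erase_cons_tail (by simp [hbe])]
      have hidx : t.length + (0 + 1) - 1 - (List.idxOf c t.reverse + 1) = t.length - 1 - List.idxOf c t.reverse := by omega
      rw [hidx, List.eraseIdx_append_of_lt_length (by omega), List.reverse_cons, ih hmt]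

-- rfind(c, 1) on h :: t, reduced to rfind on t
lemma rfindFrom_one (c h : Char) (t : List Char) :
    PySem.Chars.rfindFrom (h :: t) [c] 1 none =
      if PySem.Chars.rfind t [c] = -1 then -1 else 1 + PySem.Chars.rfind t [c] := by
  simp only [PySem.Chars.rfindFrom]
  norm_num

-- MAIN: A's while-loop for one class equals B's budgeted right-to-left drop
lemma gssRemLoop_eq (c h : Char) : ∀ (fuel : Nat) (t : List Char),
    (t.length + 1) - 11 ≤ fuel →
    gssRemLoop c fuel (h :: t) = h :: (dropKL c ((t.length + 1) - 11) t.reverse).reverse := by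
  intro fuel
  induction fuel with
  | zero =>
    intro t ht
    have h0 : (t.length + 1) - 11 = 0 := by omega
    rw [h0]
    simp [gssRemLoop]
  | succ fuel ih =>
    intro t ht
    by_cases h11 : 11 < (h :: t).length
    · by_cases hm : c ∈ t
      · have hk : List.idxOf c t.reverse < t.length := by
          have := List.idxOf_lt_length_of_mem (List.mem_reverse.mpr hm)
          simpa using this
        have hval : PySem.Chars.rfindFrom (h :: t) [c] 1 none
            = ((t.length - List.idxOf c t.reverse : Nat) : Int) := by
          rw [rfindFrom_one, rfind_single, if_pos hm]
          rw [if_neg (by omega)]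
          push_cast
          omega
        have hcond : 11 < (h :: t).length ∧ PySem.Chars.rfindFrom (h :: t) [c] 1 none ≠ -1 := by
          refine ⟨h11, ?_⟩
          rw [hval]
          omega
        rw [show gssRemLoop c (fuel + 1) (h :: t)
            = if 11 < (h :: t).length ∧ PySem.Chars.rfindFrom (h :: t) [c] 1 none ≠ -1 then
                gssRemLoop c fuel
                  (PySem.List.slice (h :: t) none (some ((PySem.Chars.rfindFrom (h :: t) [c] 1 none).toNat : Int)) ++
                   PySem.List.slice (h :: t) (some (((PySem.Chars.rfindFrom (h :: t) [c] 1 none).toNat : Int) + 1)) none)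
              else (h :: t) from rfl]
        rw [if_pos hcond, hval]
        simp only [Int.toNat_natCast]
        set k := List.idxOf c t.reverse with hkdef
        have hlen : 11 ≤ t.length := by simpa using h11
        -- the sliced-out list is h :: t.eraseIdx (t.length - 1 - k)
        have hslice : PySem.List.slice (h :: t) none (some ((t.length - k : Nat) : Int)) ++
            PySem.List.slice (h :: t) (some (((t.length - k : Nat) : Int) + 1)) none
            = h :: t.eraseIdx (t.length - 1 - k) := by
          rw [PySem.List.slice_to_natCast]
          rw [show (((t.length - k : Nat) : Int) + 1) = (((t.length - k + 1 : Nat)) : Int) by push_cast; ring]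
          rw [PySem.List.slice_from_natCast]
          obtain ⟨m, hmv⟩ : ∃ m, t.length - k = m + 1 := ⟨t.length - k - 1, by omega⟩
          rw [hmv, List.take_succ_cons, List.drop_succ_cons]
          rw [List.eraseIdx_eq_take_drop_succ]
          rw [show t.length - 1 - k = m by omega, show m + 1 = t.length - k from hmv.symm]
          simp
        rw [hslice, eraseIdx_last_occ c t hm]
        set t' := (t.reverse.erase c).reverse with ht'
        have hlen' : t'.length = t.length - 1 := by
          rw [ht', List.length_reverse, List.length_erase_of_mem (List.mem_reverse.mpr hm),
            List.length_reverse]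
        rw [ih t' (by omega)]
        have hneed : (t'.length + 1) - 11 = ((t.length + 1) - 11) - 1 := by omega
        rw [show t'.reverse = t.reverse.erase c by rw [ht', List.reverse_reverse], hneed,
          ← dropKL_erase c ((t.length + 1) - 11) t.reverse (by omega) (List.mem_reverse.mpr hm)]
      · have hrf : PySem.Chars.rfindFrom (h :: t) [c] 1 none = -1 := by
          rw [rfindFrom_one, rfind_single, if_neg hm]
          simp
        rw [show gssRemLoop c (fuel + 1) (h :: t)
            = if 11 < (h :: t).length ∧ PySem.Chars.rfindFrom (h :: t) [c] 1 none ≠ -1 then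
                gssRemLoop c fuel
                  (PySem.List.slice (h :: t) none (some ((PySem.Chars.rfindFrom (h :: t) [c] 1 none).toNat : Int)) ++
                   PySem.List.slice (h :: t) (some (((PySem.Chars.rfindFrom (h :: t) [c] 1 none).toNat : Int) + 1)) none)
              else (h :: t) from rfl]
        rw [if_neg (by rw [hrf]; simp)]
        rw [dropKL_of_not_mem c _ t.reverse (fun hmr => hm (List.mem_reverse.mp hmr))]
        rw [List.reverse_reverse]
    · rw [show gssRemLoop c (fuel + 1) (h :: t)
            = if 11 < (h :: t).length ∧ PySem.Chars.rfindFrom (h :: t) [c] 1 none ≠ -1 then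
                gssRemLoop c fuel
                  (PySem.List.slice (h :: t) none (some ((PySem.Chars.rfindFrom (h :: t) [c] 1 none).toNat : Int)) ++
                   PySem.List.slice (h :: t) (some (((PySem.Chars.rfindFrom (h :: t) [c] 1 none).toNat : Int) + 1)) none)
              else (h :: t) from rfl]
      rw [if_neg (fun hc => h11 hc.1)]
      have h0 : (t.length + 1) - 11 = 0 := by simp at h11; omega
      rw [h0]
      simp

-- one class step of B, in dropKL form
lemma gssClassStep_eq (k : Nat) (t : List Char) (c : Char) :
    gssClassStep (k, t) c
      = (k - min k (t.reverse.count c), (dropKL c k t.reverse).reverse) := by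
  unfold gssClassStep
  rw [foldB_eq_dropKL]
  simp

-- the fold over the six classes
lemma classes_fold (cs : List Char) : ∀ (h : Char) (t : List Char), 10 ≤ t.length →
    cs.foldl (fun s um => gssRemLoop um s.length s) (h :: t)
      = h :: (cs.foldl gssClassStep ((t.length + 1) - 11, t)).2 ∧
    (cs.foldl gssClassStep ((t.length + 1) - 11, t)).1
      = ((cs.foldl gssClassStep ((t.length + 1) - 11, t)).2.length + 1) - 11 ∧
    10 ≤ (cs.foldl gssClassStep ((t.length + 1) - 11, t)).2.length := by
  induction cs with
  | nil => intro h t ht; exact ⟨rfl, rfl, ht⟩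
  | cons c cs ih =>
    intro h t ht
    rw [List.foldl_cons, List.foldl_cons]
    set t1 := (dropKL c ((t.length + 1) - 11) t.reverse).reverse with ht1
    have hm : min ((t.length + 1) - 11) (t.reverse.count c) ≤ (t.length + 1) - 11 :=
      Nat.min_le_left _ _
    have hlen1 : t1.length = t.length - min ((t.length + 1) - 11) (t.reverse.count c) := by
      rw [ht1, List.length_reverse, dropKL_length, List.length_reverse]
    have hA : gssRemLoop c (h :: t).length (h :: t) = h :: t1 := by
      rw [gssRemLoop_eq c h (h :: t).length t (by simp; omega)]
    have hstep : gssClassStep ((t.length + 1) - 11, t) c = ((t1.length + 1) - 11, t1) := by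
      rw [gssClassStep_eq]
      refine congrArg₂ Prod.mk ?_ rfl
      omega
    rw [hA, hstep]
    exact ih h t1 (by omega)

lemma pyCenter_length (l : List Char) : 11 ≤ (pyCenter l 11).length := by
  unfold pyCenter
  split
  · omega
  · have hb : (11 - l.length) &&& 11 &&& 1 ≤ 1 := Nat.and_le_right
    simp only [List.length_append, List.length_replicate]
    omega

-- the two character sanitisers agree pointwise (ord ch is never negative)
lemma sanitize_pointwise (ch : Char) :
    (if 127 < (ch.toNat : Int) ∨ (ch.toNat : Int) < 0 then [' '] else [ch])
      = [if 0 ≤ (ch.toNat : Int) ∧ (ch.toNat : Int) ≤ 127 then ch else ' '] := by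
  have h0 : (0 : Int) ≤ (ch.toNat : Int) := Int.natCast_nonneg _
  by_cases hc : 127 < (ch.toNat : Int)
  · rw [if_pos (Or.inl hc), if_neg (by omega)]
  · rw [if_neg (by omega), if_pos (by omega)]

lemma final_aux (xs : List Char) : ∀ (n : Nat) (r : List Char), n ≤ xs.length →
    (PySem.List.pyRange 0 ((n : Nat) : Int) 1).foldl
      (fun r i => match PySem.List.pyGet? xs i with
        | some ch => r ++ (if 127 < (ch.toNat : Int) ∨ (ch.toNat : Int) < 0 then [' '] else [ch])
        | none => r) r
    = r ++ (xs.take n).map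
        (fun ch => if 0 ≤ (ch.toNat : Int) ∧ (ch.toNat : Int) ≤ 127 then ch else ' ') := by
  intro n
  induction n with
  | zero => intro r _; simp [PySem.List.pyRange]
  | succ n ih =>
    intro r hn
    rw [show (((n + 1 : Nat)) : Int) = ((n : Nat) : Int) + 1 by push_cast; ring,
      PySem.List.pyRange_one_succ_right (Int.natCast_nonneg n), List.foldl_append,
      ih r (by omega)]
    have hget : PySem.List.pyGet? xs ((n : Nat) : Int) = some xs[n] := by
      rw [PySem.List.pyGet?_natCast, List.getElem?_eq_getElem (by omega : n < xs.length)]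
      rfl
    simp only [List.foldl_cons, List.foldl_nil, hget]
    rw [sanitize_pointwise]
    rw [List.take_add_one, List.getElem?_eq_getElem (by omega : n < xs.length)]
    simp [List.append_assoc]
    rw [List.take_add_one, List.getElem?_map,
      List.getElem?_eq_getElem (by omega : n < xs.length)]
    simp
    rfl

-- the final character-sanitising pass: A's indexed fold = B's map over the 11-prefix
lemma final_eq (xs : List Char) (hlen : 11 ≤ xs.length) :
    (PySem.List.pyRange 0 11 1).foldl
      (fun r i => match PySem.List.pyGet? xs i with
        | some ch => r ++ (if 127 < (ch.toNat : Int) ∨ (ch.toNat : Int) < 0 then [' '] else [ch])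
        | none => r) []
    = (PySem.List.slice xs none (some 11)).map
        (fun ch => if 0 ≤ (ch.toNat : Int) ∧ (ch.toNat : Int) ≤ 127 then ch else ' ') := by
  rw [show (11 : Int) = ((11 : Nat) : Int) by norm_num, PySem.List.slice_to_natCast,
    final_aux xs 11 [] hlen, List.nil_append]

-- ===== VERDICT (by name: the statement is the Claim_ definition above) =====
theorem generate_strip_string_spec : Claim_equal_generate_strip_string := by
  unfold Claim_equal_generate_strip_string
  intro ds _hdom
  unfold Spec_generate_strip_string generate_strip_string generate_strip_string_alt
  by_cases hempty : ds = ""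
  · rw [if_pos hempty, if_pos hempty]
  · rw [if_neg hempty, if_neg hempty]
    dsimp only
    simp only [show (12 : Nat) - 1 = 11 from rfl, show ((12 : Int) - 1) = 11 by norm_num]
    have hiff : (11 < (PySem.Chars.strip ds.toList).length ∧
          PySem.Chars.endswith ds.toList ['d','B'] = true ∧ PySem.Chars.find ds.toList ['.'] ≠ -1)
        ↔ (11 < (PySem.Chars.strip ds.toList).length ∧
          PySem.Chars.endswith ds.toList ['d','B'] = true ∧ PySem.Chars.isIn ['.'] ds.toList = true) := by
      constructor <;> rintro ⟨h1, h2, h3⟩ <;> refine ⟨h1, h2, ?_⟩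
      · exact (PySem.Chars.isIn_iff_infix _ _).mpr ((PySem.Chars.find_ne_neg_one_iff _ _).mp h3)
      · exact (PySem.Chars.find_ne_neg_one_iff _ _).mpr ((PySem.Chars.isIn_iff_infix _ _).mp h3)
    rw [if_congr hiff rfl rfl]
    set s := if 11 < (PySem.Chars.strip ds.toList).length ∧
        PySem.Chars.endswith ds.toList ['d','B'] = true ∧ PySem.Chars.isIn ['.'] ds.toList = true
      then PySem.List.slice ds.toList none (some (-2)) else ds.toList with hs
    by_cases h11 : 11 < s.length
    · obtain ⟨hh, tt, hsc⟩ : ∃ hh tt, s = hh :: tt := by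
        cases hcs : s with
        | nil => rw [hcs] at h11; simp at h11
        | cons hh tt => exact ⟨hh, tt, rfl⟩
      rw [if_pos h11, if_pos h11, hsc]
      have h10 : 10 ≤ tt.length := by rw [hsc] at h11; simp at h11; omega
      obtain ⟨hfold, hneed, hlen2⟩ := classes_fold [' ', 'i', 'o', 'u', 'e', 'a'] hh tt h10
      have hget0 : PySem.List.pyGet? (hh :: tt) (0 : Int) = some hh := by simp [PySem.List.pyGet?, PySem.List.pyIdx?]
      rw [PySem.List.slice_from_one, List.tail_cons, hget0]
      rw [show (hh :: tt).length - 11 = (tt.length + 1) - 11 by simp]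
      rw [hfold]
      rw [show (match some hh with | some h => [h] | none => ([] : List Char)) = [hh] from rfl]
      rw [List.singleton_append]
      rw [final_eq _ (by simp only [List.length_cons]; omega)]
    · rw [if_neg h11, if_neg h11]
      rw [final_eq _ (pyCenter_length s)]
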